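-- pv_equiv track=rewrite | github.com/ishandutta2007/ProjectEuler-2 | eu103.py | check_special_subset_sum
-- ===== SOURCE A (Python) =====
-- import itertools
--
-- def check_special_subset_sum(S):
--     if len(S) != len(set(S)):
--         return False
--
--     S = sorted(S)
--
--     l = (len(S) + 1) // 2
--     r = l - 1
--
--     if sum(S[:l]) <= sum(S[-r:]):
--         return False
--
--     sums = []
--     for i in range(1, len(S) + 1):
--         sums += list(itertools.combinations(S, i))
--     sums = [sum(s) for s in sums]
--
--     if len(sums) != len(set(sums)):
--         return False
--
--     return True
-- ===== SOURCE B (Python) =====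
-- def check_special_subset_sum(S):
--     if len(S) != len(set(S)):
--         return False
--
--     S = sorted(S)
--
--     l = (len(S) + 1) // 2
--     r = l - 1
--
--     if sum(S[:l]) <= sum(S[-r:]):
--         return False
--
--     # incremental reachable-sums pass instead of materialising all combinations
--     sums = set()
--     for x in S:
--         new = {x} | {s + x for s in sums}
--         if len(new) != len(sums) + 1 or sums & new:
--             return False
--         sums |= new
--
--     return True
-- ===== Notes on version B (the rewrite author's own statement) =====
-- stated objective: alternative
-- what changed: B keeps A's distinctness and half-sum guards but replaces A's materialisation of all 2^n combinations followed by a global duplicate test with an incremental reachable-sums set that detects a sum collision (and returns False) as soon as one element's contributions overlap the existing subset sums.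
import Mathlib
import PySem

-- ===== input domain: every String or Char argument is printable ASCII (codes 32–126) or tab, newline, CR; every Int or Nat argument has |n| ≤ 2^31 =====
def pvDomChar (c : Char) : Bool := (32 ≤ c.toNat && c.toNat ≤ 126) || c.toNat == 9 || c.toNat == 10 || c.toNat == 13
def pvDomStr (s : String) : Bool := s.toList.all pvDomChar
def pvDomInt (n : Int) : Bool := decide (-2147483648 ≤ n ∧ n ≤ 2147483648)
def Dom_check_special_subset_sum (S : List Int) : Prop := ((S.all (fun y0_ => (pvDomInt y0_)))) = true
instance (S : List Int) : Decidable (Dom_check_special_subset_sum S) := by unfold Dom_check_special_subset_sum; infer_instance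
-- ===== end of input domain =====

-- B keeps A's two guards but replaces A's materialisation of all combinations (then one global
-- duplicate test) with an incremental reachable-sums set that returns False at the first collision
-- (objective: alternative).

-- ===== PORT A =====
-- itertools.combinations(S, i): the chosen elements in index order (itertools' order)
def pyCombos : List Int → Nat → List (List Int)
  | _, 0 => [[]]
  | [], _ + 1 => []
  | x :: xs, n + 1 => (pyCombos xs n).map (x :: ·) ++ pyCombos xs (n + 1)

def check_special_subset_sum (S : List Int) : Bool :=
  if S.length ≠ (PySem.Set.ofList S).length then false
  else
    let S' := PySem.List.sorted S (fun x => x)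
    let l : Int := PySem.Int.floordiv ((S'.length : Int) + 1) 2
    let r : Int := l - 1
    if (PySem.List.slice S' none (some l)).sum ≤ (PySem.List.slice S' (some (-r)) none).sum then
      false
    else
      let combos := (PySem.List.pyRange 1 ((S'.length : Int) + 1)).foldl
        (fun acc i => acc ++ pyCombos S' i.toNat) []
      let sums := combos.map (fun s => s.sum)
      if sums.length ≠ (PySem.Set.ofList sums).length then false
      else true

-- ===== PORT B =====
-- for x in S: new = {x} | {s+x for s in sums}; fail on any collision; sums |= new
def altLoop : List Int → PySem.Set Int → Bool
  | [], _ => true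
  | x :: rest, sums =>
    let new : PySem.Set Int :=
      PySem.Set.union (PySem.Set.ofList [x]) (PySem.Set.ofList (sums.map (fun s => s + x)))
    if new.length ≠ sums.length + 1 ∨ PySem.Set.inter sums new ≠ [] then false
    else altLoop rest (PySem.Set.union sums new)

def check_special_subset_sum_alt (S : List Int) : Bool :=
  if S.length ≠ (PySem.Set.ofList S).length then false
  else
    let S' := PySem.List.sorted S (fun x => x)
    let l : Int := PySem.Int.floordiv ((S'.length : Int) + 1) 2
    let r : Int := l - 1
    if (PySem.List.slice S' none (some l)).sum ≤ (PySem.List.slice S' (some (-r)) none).sum then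
      false
    else
      altLoop S' PySem.Set.empty

-- ===== PRECONDITION & SPEC =====
def Spec_check_special_subset_sum (S : List Int) (out : Bool) : Prop := out = check_special_subset_sum_alt S
instance (S : List Int) (out : Bool) : Decidable (Spec_check_special_subset_sum S out) := by unfold Spec_check_special_subset_sum; infer_instance

-- ===== CLAIM (what is proved, stated in full; the proofs are below) =====
def Claim_equal_check_special_subset_sum : Prop := ∀ (S : List Int), Dom_check_special_subset_sum S → Spec_check_special_subset_sum S (check_special_subset_sum S)

-- ===== LEMMAS AND PROOFS =====

def pvStep (M : Multiset Int) (x : Int) : Multiset Int := (x ::ₘ M.map (· + x)) + M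
def pvExt (M : Multiset Int) : List Int → Multiset Int
  | [] => M
  | x :: l => pvExt (pvStep M x) l

theorem pvExt_closed (l : List Int) : ∀ M : Multiset Int,
    pvExt M l = M + pvExt 0 l + M.bind (fun m => (pvExt 0 l).map (m + ·)) := by
  induction l with
  | nil => intro M; simp [pvExt]
  | cons x l ih =>
    intro M
    have h0 : pvExt 0 (x :: l) = pvExt (x ::ₘ 0) l := by simp [pvExt, pvStep]
    rw [show pvExt M (x :: l) = pvExt (pvStep M x) l from rfl, ih, h0, ih (x ::ₘ 0)]
    simp only [pvStep, Multiset.cons_bind, Multiset.add_bind, Multiset.cons_add,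
      Multiset.map_cons, Multiset.map_add, Multiset.bind_map, Multiset.map_map,
      Multiset.cons_zero, Multiset.singleton_bind, Multiset.singleton_add, Multiset.bind_cons,
      Multiset.bind_add, Function.comp]
    have hb : M.bind (fun m => (pvExt 0 l).map (fun b => (m + x) + b))
        = M.bind (fun m => (pvExt 0 l).map (fun b => m + (x + b))) := by
      refine Multiset.bind_congr (fun a _ => Multiset.map_congr rfl (fun b _ => by ring))
    have hm : Multiset.map (fun y => y + x) M = Multiset.map (fun y => x + y) M :=
      Multiset.map_congr rfl (fun a _ => by ring)
    rw [hm]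
    simp only [← Multiset.singleton_add]
    abel

theorem pvExt_cons_zero (x : Int) (l : List Int) :
    pvExt 0 (x :: l) = (x ::ₘ (pvExt 0 l).map (x + ·)) + pvExt 0 l := by
  have h0 : pvExt 0 (x :: l) = pvExt (x ::ₘ 0) l := by simp [pvExt, pvStep]
  rw [h0, pvExt_closed l (x ::ₘ 0)]
  simp only [Multiset.cons_zero, Multiset.singleton_bind, Multiset.cons_add,
    Multiset.singleton_add]
  abel

theorem pvExt_not_nodup {M : Multiset Int} (l : List Int) (h : ¬ M.Nodup) :
    ¬ (pvExt M l).Nodup := by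
  intro hn
  exact h (Multiset.nodup_of_le (by rw [pvExt_closed]; exact le_add_right (le_add_right le_rfl)) hn)

theorem pyCombos_big (L : List Int) : ∀ n, L.length < n → pyCombos L n = [] := by
  induction L with
  | nil => intro n h; cases n with
    | zero => simp at h
    | succ m => rfl
  | cons x xs ih =>
    intro n h
    cases n with
    | zero => simp at h
    | succ m =>
      simp only [List.length_cons] at h
      simp [pyCombos, ih m (by omega), ih (m+1) (by omega)]

def pvCF (L : List Int) : List (List Int) := (List.range L.length).flatMap (fun k => pyCombos L (k + 1))

theorem coe_flatMap_append {α β : Type} (l : List α) (f g : α → List β) :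
    (↑(l.flatMap (fun k => f k ++ g k)) : Multiset β) = ↑(l.flatMap f) + ↑(l.flatMap g) := by
  induction l with
  | nil => simp
  | cons a l ih =>
    simp only [List.flatMap_cons, ← Multiset.coe_add, ih]
    abel

theorem pyCombos_zero (L : List Int) : pyCombos L 0 = [[]] := by
  cases L <;> rfl

theorem coe_CF_cons (x : Int) (xs : List Int) :
    (↑(pvCF (x :: xs)) : Multiset (List Int)) =
      ([x] ::ₘ (↑(pvCF xs) : Multiset (List Int)).map (x :: ·)) + ↑(pvCF xs) := by
  have h1 : pvCF (x :: xs) = (List.range (xs.length + 1)).flatMap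
      (fun k => (pyCombos xs k).map (x :: ·) ++ pyCombos xs (k + 1)) := by
    simp [pvCF, pyCombos]
  rw [h1, coe_flatMap_append]
  have h2 : (List.range (xs.length + 1)).flatMap (fun k => (pyCombos xs k).map (x :: ·))
      = [[x]] ++ (pvCF xs).map (x :: ·) := by
    rw [List.range_succ_eq_map]
    simp only [List.flatMap_cons, List.flatMap_map, pvCF, List.map_flatMap, pyCombos_zero,
      Nat.succ_eq_add_one, List.map_cons, List.map_nil]
  have h3 : (List.range (xs.length + 1)).flatMap (fun k => pyCombos xs (k + 1))
      = pvCF xs := by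
    rw [List.range_succ, List.flatMap_append]
    simp [pvCF, pyCombos_big xs (xs.length + 1) (by omega)]
  rw [h2, h3]
  simp only [List.singleton_append]
  rfl

theorem coe_CF_sum (L : List Int) :
    (↑((pvCF L).map (fun s => s.sum)) : Multiset Int) = pvExt 0 L := by
  induction L with
  | nil => rfl
  | cons x xs ih =>
    rw [pvExt_cons_zero, ← ih]
    have := congrArg (Multiset.map (fun s : List Int => s.sum)) (coe_CF_cons x xs)
    rw [Multiset.map_coe] at this
    rw [this]
    simp only [Multiset.map_add, Multiset.map_cons, Multiset.map_coe]
    rw [List.map_map, List.map_map]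
    have hx : ([x] : List Int).sum = x := by simp
    rw [hx]
    congr 2


theorem ofList_sublist (xs : List Int) : (PySem.Set.ofList xs).Sublist xs := by
  induction xs using List.reverseRecOn with
  | nil => simp [PySem.Set.ofList_nil]
  | append_singleton xs x ih =>
    rw [PySem.Set.ofList_append_singleton, PySem.Set.add_eq_ite]
    split_ifs with h
    · exact ih.trans (List.sublist_append_left xs [x])
    · exact ih.append (List.Sublist.refl [x])

theorem length_ofList_iff (xs : List Int) :
    xs.length = (PySem.Set.ofList xs).length ↔ xs.Nodup := by
  constructor
  · intro h
    have := (ofList_sublist xs).eq_of_length h.symm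
    rw [← this]
    exact PySem.Set.nodup_ofList xs
  · intro h
    rw [PySem.Set.ofList_eq_self_of_nodup xs h]

theorem update_ofList {α : Type} [BEq α] [LawfulBEq α] (s : PySem.Set α) (l : List α) :
    s.update (PySem.Set.ofList l) = s.update l := by
  rw [PySem.Set.update_eq_append_filter, PySem.Set.update_eq_append_filter,
    PySem.Set.ofList_ofList]

theorem union_ofList_ofList {α : Type} [BEq α] [LawfulBEq α] (l1 l2 : List α) :
    PySem.Set.union (PySem.Set.ofList l1) (PySem.Set.ofList l2) = PySem.Set.ofList (l1 ++ l2) := by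
  show (PySem.Set.ofList l1).update (PySem.Set.ofList l2) = _
  rw [update_ofList, PySem.Set.ofList_append]

theorem altLoop_spec (rest : List Int) : ∀ s : PySem.Set Int, s.Nodup →
    altLoop rest s = decide ((pvExt (↑s) rest).Nodup) := by
  induction rest with
  | nil =>
    intro s hs
    simp [altLoop, pvExt, hs]
  | cons x rest ih =>
    intro s hs
    set mapl := s.map (fun t => t + x) with hmapl
    set L0 := x :: mapl with hL0
    have hmn : mapl.Nodup := hs.map (fun a b hab => by omega)
    have hnew : PySem.Set.union (PySem.Set.ofList [x]) (PySem.Set.ofList mapl)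
        = PySem.Set.ofList L0 := by
      rw [union_ofList_ofList]; rfl
    set M : Multiset Int := (↑s : Multiset Int) with hM
    set N : Multiset Int := x ::ₘ M.map (· + x) with hN
    have hNL0 : (↑L0 : Multiset Int) = N := by
      rw [hL0, hN, hM]
      simp [hmapl]
    have hstep : pvStep M x = N + M := rfl
    -- the collision test is exactly "pvStep M x is not nodup"
    have hlen : (PySem.Set.ofList L0).length = s.length + 1 ↔ L0.Nodup := by
      have := length_ofList_iff L0
      simp only [hL0, List.length_cons, eq_comm] at this ⊢
      simpa [hmapl] using this
    have hint : PySem.Set.inter s (PySem.Set.ofList L0) = [] ↔ ∀ y ∈ s, y ∉ L0 := by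
      simp [PySem.Set.inter, List.filter_eq_nil_iff]
    have hnodupN : N.Nodup ↔ L0.Nodup := by rw [← hNL0, Multiset.coe_nodup]
    have hdisj : Disjoint N M ↔ ∀ y ∈ s, y ∉ L0 := by
      rw [disjoint_comm, Multiset.disjoint_left]
      constructor
      · intro h y hy hyL
        exact h (Multiset.mem_coe.mpr hy) (by rw [← hNL0]; exact Multiset.mem_coe.mpr hyL)
      · intro h a ha haN
        rw [← hNL0] at haN
        exact h a (Multiset.mem_coe.mp ha) (Multiset.mem_coe.mp haN)
    have hM_nodup : M.Nodup := by rw [hM, Multiset.coe_nodup]; exact hs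
    by_cases hc : L0.Nodup ∧ (∀ y ∈ s, y ∉ L0)
    · -- success branch
      have hcond : ¬ ((PySem.Set.ofList L0).length ≠ s.length + 1 ∨
          PySem.Set.inter s (PySem.Set.ofList L0) ≠ []) := by
        push Not
        exact ⟨hlen.mpr hc.1, hint.mpr hc.2⟩
      have hofl : PySem.Set.ofList L0 = L0 := PySem.Set.ofList_eq_self_of_nodup L0 hc.1
      have hupd : PySem.Set.union s (PySem.Set.ofList L0) = s ++ L0 := by
        show s.update (PySem.Set.ofList L0) = _
        rw [hofl]
        exact PySem.Set.update_eq_append_of_disjoint s L0 hc.1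
          (fun y hy hys => hc.2 y hys hy)
      have hsl : (s ++ L0).Nodup :=
        hs.append hc.1 (fun a ha hb => hc.2 a ha hb)
      have : altLoop (x :: rest) s = altLoop rest (s ++ L0) := by
        simp only [altLoop, ← hmapl, hnew, hupd]
        rw [if_neg hcond]
      rw [this, ih _ hsl]
      have hcoe : (↑(s ++ L0) : Multiset Int) = pvStep M x := by
        rw [hstep]
        simp only [← Multiset.coe_add]
        rw [← hNL0, hM]
        exact Multiset.add_comm _ _ |>.symm ▸ rfl
      rw [show pvExt M (x :: rest) = pvExt (pvStep M x) rest from rfl, hcoe]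
    · -- collision: A's full table has a duplicate sum as well
      have hcond : (PySem.Set.ofList L0).length ≠ s.length + 1 ∨
          PySem.Set.inter s (PySem.Set.ofList L0) ≠ [] := by
        by_contra hno
        push Not at hno
        exact hc ⟨hlen.mp hno.1, hint.mp hno.2⟩
      have hfail : ¬ (pvStep M x).Nodup := by
        rw [hstep, Multiset.nodup_add]
        rintro ⟨h1, _, h3⟩
        exact hc ⟨hnodupN.mp h1, hdisj.mp h3⟩
      have : altLoop (x :: rest) s = false := by
        simp only [altLoop, ← hmapl, hnew]
        rw [if_pos hcond]
      rw [this, show pvExt M (x :: rest) = pvExt (pvStep M x) rest from rfl]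
      simp [pvExt_not_nodup rest hfail]


theorem pyRange_map (n : Nat) :
    PySem.List.pyRange 1 ((n : Int) + 1) = (List.range n).map (fun k : Nat => ((k : Int) + 1)) := by
  induction n with
  | zero => rfl
  | succ m ih =>
    have h1 : ((m : Int) + 1 + 1) = ((m + 1 : Nat) : Int) + 1 := by push_cast; ring
    rw [← h1, PySem.List.pyRange_one_succ_right (by omega), ih, List.range_succ]
    simp

theorem altLoop_empty_eq (L : List Int) :
    altLoop L PySem.Set.empty =
      decide ((List.map (fun s => s.sum) (List.foldl (fun acc i => acc ++ pyCombos L i.toNat) []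
          (PySem.List.pyRange 1 ((L.length : Int) + 1)))).length =
        (PySem.Set.ofList (List.map (fun s => s.sum) (List.foldl (fun acc i => acc ++ pyCombos L i.toNat) []
          (PySem.List.pyRange 1 ((L.length : Int) + 1))))).length) := by
  have hflat : ∀ n : Nat, ((List.range n).map (fun k : Nat => ((k : Int) + 1))).flatMap
      (fun i => pyCombos L i.toNat) = (List.range n).flatMap (fun k => pyCombos L (k + 1)) := by
    intro n
    induction n with
    | zero => rfl
    | succ m ih =>
      rw [List.range_succ]
      simp only [List.map_append, List.flatMap_append, ih, List.map_cons, List.map_nil,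
        List.flatMap_cons, List.flatMap_nil]
      have ht : ((m : Int) + 1).toNat = m + 1 := by omega
      rw [ht]
  have hconv : List.foldl (fun acc i => acc ++ pyCombos L i.toNat) []
      (PySem.List.pyRange 1 ((L.length : Int) + 1)) = pvCF L := by
    rw [PySem.List.foldl_append_eq_flatMap, List.nil_append, pyRange_map L.length, hflat]
    rfl
  rw [hconv, altLoop_spec L PySem.Set.empty List.nodup_nil,
    show (↑(PySem.Set.empty : PySem.Set Int) : Multiset Int) = 0 from rfl]
  refine decide_eq_decide.mpr ?_
  rw [← coe_CF_sum L, Multiset.coe_nodup]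
  exact (length_ofList_iff _).symm

theorem ports_agree (S : List Int) :
    check_special_subset_sum S = check_special_subset_sum_alt S := by
  unfold check_special_subset_sum check_special_subset_sum_alt
  dsimp only
  split_ifs with h1 h2 h3
  · rfl
  · rfl
  · rw [altLoop_empty_eq]
    symm
    simp only [decide_eq_false_iff_not]
    exact h3
  · rw [altLoop_empty_eq]
    symm
    simp only [decide_eq_true_eq]
    exact not_ne_iff.mp h3

-- ===== VERDICT (by name: the statement is the Claim_ definition above) =====
theorem check_special_subset_sum_spec : Claim_equal_check_special_subset_sum := by
  intro S _
  unfold Spec_check_special_subset_sum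
  exact ports_agree S
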